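-- pv_equiv track=rewrite | github.com/yangbobo2021/test_function_dup | test5.py | Test100
-- ===== SOURCE A (Python) =====
-- def Test100(data):
--     sum = 0
--     max_value = 0
--     for item in data:
--         if max_value < item['value']:
--             max_value = item['value']
--         sum += 1
--
--     return sum, max_value
-- ===== SOURCE B (Python) =====
-- def Test100(data):
--     items = list(data)
--
--     def go(chunk):
--         if not chunk:
--             return (0, 0)
--         if len(chunk) == 1:
--             v = chunk[0]['value']
--             return (1, v if v > 0 else 0)
--         mid = len(chunk) // 2
--         c1, m1 = go(chunk[:mid])
--         c2, m2 = go(chunk[mid:])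
--         return (c1 + c2, m1 if m1 > m2 else m2)
--
--     return go(items)
-- ===== Notes on version B (the rewrite author's own statement) =====
-- stated objective: alternative
-- what changed: Replaces A's single left-to-right accumulation loop (running count plus running max with an if) by a divide-and-conquer recursion that splits the list in half, solves the halves independently and merges (count sum, larger max); correctness rests on max being associative with identity 0 for the nonnegative floor.
import Mathlib
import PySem

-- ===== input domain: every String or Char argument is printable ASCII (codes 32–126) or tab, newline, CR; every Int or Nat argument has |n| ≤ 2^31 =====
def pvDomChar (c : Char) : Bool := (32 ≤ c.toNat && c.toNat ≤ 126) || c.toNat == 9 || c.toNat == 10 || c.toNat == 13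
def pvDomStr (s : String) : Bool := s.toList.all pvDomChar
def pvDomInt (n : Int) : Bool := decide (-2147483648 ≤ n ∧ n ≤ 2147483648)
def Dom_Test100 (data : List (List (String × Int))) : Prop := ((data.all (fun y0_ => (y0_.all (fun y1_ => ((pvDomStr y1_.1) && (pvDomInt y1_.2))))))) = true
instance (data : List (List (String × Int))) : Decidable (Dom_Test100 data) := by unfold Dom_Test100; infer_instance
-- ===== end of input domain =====

-- B replaces A's single accumulation loop by a divide-and-conquer recursion
-- (split in half, solve halves, merge counts and maxima); same results, not faster.
-- Equivalence is proved on inputs where every item has the key "value"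
-- (elsewhere both Pythons raise KeyError).

-- ===== PORT A =====
-- item['value'] on a dict with the key present; Pre_ excludes the KeyError case.
def pvVal (item : List (String × Int)) : Int :=
  ((PySem.Dict.mk item).get? "value").getD 0

def Test100 (data : List (List (String × Int))) : Int × Int :=
  data.foldl (fun (st : Int × Int) item =>
    let v := pvVal item
    (st.1 + 1, if st.2 < v then v else st.2)) (0, 0)

-- ===== PORT B =====
-- go(chunk) of Source B: divide and conquer over the chunk
def pvGo (chunk : List (List (String × Int))) : Int × Int :=
  match h : chunk with
  | [] => (0, 0)
  | [x] => (1, if pvVal x > 0 then pvVal x else 0)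
  | a :: b :: rest =>
    let mid : Nat := chunk.length / 2
    let p1 := pvGo (chunk.take mid)
    let p2 := pvGo (chunk.drop mid)
    (p1.1 + p2.1, if p1.2 > p2.2 then p1.2 else p2.2)
  termination_by chunk.length
  decreasing_by
    · simp [h, List.length_take]; omega
    · simp [h]; omega

def Test100_alt (data : List (List (String × Int))) : Int × Int :=
  let items := data
  pvGo items

-- ===== PRECONDITION & SPEC =====
-- Pre_ excludes exactly the inputs on which A raises KeyError: an item without key "value".
def Pre_Test100 (data : List (List (String × Int))) : Prop :=
  (data.all (fun item => item.any (fun p => p.1 == "value"))) = true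
instance (data : List (List (String × Int))) : Decidable (Pre_Test100 data) := by unfold Pre_Test100; infer_instance
def pvWitness_Test100 : (List (List (String × Int))) := [[("value", 3)], [("value", -2), ("x", 9)]]

def Spec_Test100 (data : List (List (String × Int))) (out : Int × Int) : Prop := out = Test100_alt data
instance (data : List (List (String × Int))) (out : Int × Int) : Decidable (Spec_Test100 data out) := by unfold Spec_Test100; infer_instance

-- ===== CLAIM (what is proved, stated in full; the proofs are below) =====
def Claim_equal_Test100 : Prop := ∀ (data : List (List (String × Int))), Dom_Test100 data → Pre_Test100 data → Spec_Test100 data (Test100 data)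

-- ===== LEMMAS AND PROOFS =====
-- the common characterisation: (length, max of the 0-floored values)
def pvM (l : List (List (String × Int))) : Int := (l.map pvVal).foldl max 0

lemma pvFoldl_max_init (vs : List Int) : ∀ m : Int, 0 ≤ m → vs.foldl max m = max m (vs.foldl max 0) := by
  induction vs with
  | nil => intro m hm; simp; omega
  | cons v t ih =>
    intro m hm
    simp only [List.foldl_cons]
    rw [ih (max m v) (by omega), ih (max 0 v) (by omega)]
    omega

lemma pvFoldl_max_nonneg (vs : List Int) : ∀ m : Int, 0 ≤ m → 0 ≤ vs.foldl max m := by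
  induction vs with
  | nil => intro m hm; simpa using hm
  | cons v t ih => intro m hm; exact ih (max m v) (by omega)

lemma pvM_append (a b : List (List (String × Int))) : pvM (a ++ b) = max (pvM a) (pvM b) := by
  simp only [pvM, List.map_append, List.foldl_append]
  rw [pvFoldl_max_init _ _ (pvFoldl_max_nonneg _ _ le_rfl)]

lemma pvA_char (data : List (List (String × Int))) : Test100 data = ((data.length : Int), pvM data) := by
  suffices h : ∀ (s m : Int),
      data.foldl (fun (st : Int × Int) item =>
        let v := pvVal item
        (st.1 + 1, if st.2 < v then v else st.2)) (s, m)
      = (s + data.length, (data.map pvVal).foldl max m) by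
    simpa [Test100, pvM] using h 0 0
  induction data with
  | nil => intro s m; simp
  | cons hd tl ih =>
    intro s m
    simp only [List.foldl_cons, List.map_cons, List.length_cons, ih]
    have h2 : (if m < pvVal hd then pvVal hd else m) = max m (pvVal hd) := by
      by_cases h : m < pvVal hd
      · rw [if_pos h, max_eq_right h.le]
      · rw [if_neg h, max_eq_left (by omega)]
    rw [h2]
    refine Prod.ext ?_ rfl
    push_cast; ring

lemma pvGo_char (chunk : List (List (String × Int))) :
    pvGo chunk = ((chunk.length : Int), pvM chunk) := by
  induction chunk using pvGo.induct with
  | case1 => simp [pvGo, pvM]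
  | case2 x =>
    rw [pvGo]
    refine Prod.ext (by norm_num) ?_
    show (if pvVal x > 0 then pvVal x else 0) = pvM [x]
    simp only [pvM, List.map_cons, List.map_nil, List.foldl_cons, List.foldl_nil]
    split_ifs <;> omega
  | case3 a b rest mid ih1 ih2 =>
    rw [pvGo]
    rw [ih1, ih2]
    have hsplit := List.take_append_drop ((a :: b :: rest).length / 2) (a :: b :: rest)
    have hlen : ((a :: b :: rest).take ((a :: b :: rest).length / 2)).length
        + ((a :: b :: rest).drop ((a :: b :: rest).length / 2)).length
        = (a :: b :: rest).length := by
      rw [← List.length_append, hsplit]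
    have hM := pvM_append ((a :: b :: rest).take ((a :: b :: rest).length / 2))
        ((a :: b :: rest).drop ((a :: b :: rest).length / 2))
    rw [hsplit] at hM
    refine Prod.ext ?_ ?_
    · show ((((a :: b :: rest).take ((a :: b :: rest).length / 2)).length : Int)
          + (((a :: b :: rest).drop ((a :: b :: rest).length / 2)).length : Int))
          = ((a :: b :: rest).length : Int)
      omega
    · show (if pvM ((a :: b :: rest).take ((a :: b :: rest).length / 2))
            > pvM ((a :: b :: rest).drop ((a :: b :: rest).length / 2))
          then pvM ((a :: b :: rest).take ((a :: b :: rest).length / 2))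
          else pvM ((a :: b :: rest).drop ((a :: b :: rest).length / 2)))
          = pvM (a :: b :: rest)
      rw [hM]
      split_ifs <;> omega

-- ===== VERDICT (by name: the statement is the Claim_ definition above) =====
theorem Test100_spec : Claim_equal_Test100 := by
  intro data _ _
  show Test100 data = Test100_alt data
  rw [pvA_char, Test100_alt, pvGo_char]
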